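-- pv_equiv track=rewrite | github.com/patyb7/Validation_Barramento | app/rules/address/cep/validator.py | _is_sequential_or_repeated
-- ===== SOURCE A (Python) =====
-- def _is_sequential_or_repeated(cleaned_cep: str) -> bool:
--     """Verifica se o CEP tem 4 ou mais dígitos sequenciais ou repetidos."""
--     if len(cleaned_cep) < 4:
--         return False
--
--     # Verifica sequenciais (ex: 1234, 5432)
--     for i in range(len(cleaned_cep) - 3):
--         subset = cleaned_cep[i:i+4]
--         if all(d.isdigit() for d in subset):
--             s0, s1, s2, s3 = int(subset[0]), int(subset[1]), int(subset[2]), int(subset[3])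
--             if (s0 + 1 == s1 and s1 + 1 == s2 and s2 + 1 == s3) or \
--                (s0 - 1 == s1 and s1 - 1 == s2 and s2 - 1 == s3):
--                 return True
--
--     # Verifica repetidos (ex: 1111, 8888)
--     for i in range(len(cleaned_cep) - 3):
--         subset = cleaned_cep[i:i+4]
--         if subset[0] == subset[1] == subset[2] == subset[3]:
--             return True
--     return False
-- ===== SOURCE B (Python) =====
-- def _is_sequential_or_repeated(cleaned_cep: str) -> bool:
--     """Single left-to-right scan with running-length counters (equal / ascending / descending)."""
--     run_eq = run_up = run_down = 1
--     prev = None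
--     for ch in cleaned_cep:
--         if prev is not None:
--             run_eq = run_eq + 1 if ch == prev else 1
--             if prev.isdigit() and ch.isdigit():
--                 d = int(ch) - int(prev)
--                 run_up = run_up + 1 if d == 1 else 1
--                 run_down = run_down + 1 if d == -1 else 1
--             else:
--                 run_up = run_down = 1
--             if run_eq >= 4 or run_up >= 4 or run_down >= 4:
--                 return True
--         prev = ch
--     return False
-- ===== Notes on version B (the rewrite author's own statement) =====
-- stated objective: faster
-- what changed: A's two separate index loops that slice out every 4-character window and redo isdigit/int work per window are replaced by one left-to-right scan over adjacent pairs maintaining three running-length counters (equal, ascending, descending) that returns as soon as any run reaches 4.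
import Mathlib
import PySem

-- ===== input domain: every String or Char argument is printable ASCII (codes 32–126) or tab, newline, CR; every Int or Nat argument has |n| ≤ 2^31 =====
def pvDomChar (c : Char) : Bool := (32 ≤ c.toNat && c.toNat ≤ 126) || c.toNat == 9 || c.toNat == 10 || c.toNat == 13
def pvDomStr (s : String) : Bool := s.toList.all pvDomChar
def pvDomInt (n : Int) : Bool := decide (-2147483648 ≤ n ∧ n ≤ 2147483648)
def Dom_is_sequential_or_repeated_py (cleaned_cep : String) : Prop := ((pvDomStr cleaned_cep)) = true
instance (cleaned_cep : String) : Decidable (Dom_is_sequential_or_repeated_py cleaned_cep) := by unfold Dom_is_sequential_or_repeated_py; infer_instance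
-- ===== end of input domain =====

-- B replaces A's two index-and-slice window scans by one left-to-right scan with three running-length counters (objective: alternative single-pass decomposition).

-- ===== PORT A =====
-- int(c) for a single digit character (guarded by isdigit in A's code); exact there.
def digitVal (c : Char) : Int := (c.toNat : Int) - 48

-- window test of A's first loop: all four chars are digits and their ints ascend or descend by 1
-- (the [a,b,c,d] match reads the length-4 slice exactly as A's in-range subset[0..3] indexing does;
--  shorter slices are unreachable for the indices A's range produces)
def pySeqWin (subset : List Char) : Bool :=
  match subset with
  | [a, b, c, d] =>
    if a.isDigit && b.isDigit && c.isDigit && d.isDigit then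
      let s0 := digitVal a; let s1 := digitVal b; let s2 := digitVal c; let s3 := digitVal d
      ((s0 + 1 == s1) && (s1 + 1 == s2) && (s2 + 1 == s3)) ||
      ((s0 - 1 == s1) && (s1 - 1 == s2) && (s2 - 1 == s3))
    else false
  | _ => false

-- window test of A's second loop: subset[0]==subset[1]==subset[2]==subset[3]
def pyEqWin (subset : List Char) : Bool :=
  match subset with
  | [a, b, c, d] => a == b && b == c && c == d
  | _ => false

def is_sequential_or_repeated_py (cleaned_cep : String) : Bool :=
  let cs := cleaned_cep.toList
  if cs.length < 4 then false
  else
    if (List.range (cs.length - 3)).any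
        (fun i => pySeqWin (PySem.List.slice cs (some (Int.ofNat i)) (some (Int.ofNat i + 4)))) then
      true
    else
      (List.range (cs.length - 3)).any
        (fun i => pyEqWin (PySem.List.slice cs (some (Int.ofNat i)) (some (Int.ofNat i + 4))))

-- ===== PORT B =====
-- adjacent-pair tests of Source B: ch == prev; both chars digits and int difference +1 / -1
def eqP (prev c : Char) : Bool := c == prev
def upP (prev c : Char) : Bool := prev.isDigit && c.isDigit && (digitVal c - digitVal prev == 1)
def downP (prev c : Char) : Bool := prev.isDigit && c.isDigit && (digitVal c - digitVal prev == -1)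

-- the loop of Source B: running lengths of the equal / ascending / descending runs ending at prev
def scanRuns (prev : Char) (re ru rd : Nat) : List Char → Bool
  | [] => false
  | c :: t =>
    let re' := if eqP prev c then re + 1 else 1
    let ru' := if upP prev c then ru + 1 else 1
    let rd' := if downP prev c then rd + 1 else 1
    if 4 ≤ re' || 4 ≤ ru' || 4 ≤ rd' then true
    else scanRuns c re' ru' rd' t

def is_sequential_or_repeated_py_alt (cleaned_cep : String) : Bool :=
  match cleaned_cep.toList with
  | [] => false
  | c :: t => scanRuns c 1 1 1 t

-- ===== PRECONDITION & SPEC =====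
def Spec_is_sequential_or_repeated_py (cleaned_cep : String) (out : Bool) : Prop := out = is_sequential_or_repeated_py_alt cleaned_cep
instance (cleaned_cep : String) (out : Bool) : Decidable (Spec_is_sequential_or_repeated_py cleaned_cep out) := by unfold Spec_is_sequential_or_repeated_py; infer_instance

-- ===== CLAIM (what is proved, stated in full; the proofs are below) =====
def Claim_equal_is_sequential_or_repeated_py : Prop := ∀ (cleaned_cep : String), Dom_is_sequential_or_repeated_py cleaned_cep → Spec_is_sequential_or_repeated_py cleaned_cep (is_sequential_or_repeated_py cleaned_cep)

-- ===== LEMMAS AND PROOFS =====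

-- a 4-window chained by one adjacent-pair predicate
def chain3 (P : Char → Char → Bool) (a b c d : Char) : Bool := P a b && P b c && P c d

-- "this 4-window is sequential or repeated"
def good4 (a b c d : Char) : Bool :=
  chain3 upP a b c d || chain3 downP a b c d || chain3 eqP a b c d

-- "some 4-window of the list is good": the common characterisation of both programs
def winAny : List Char → Bool
  | a :: b :: c :: d :: t => good4 a b c d || winAny (b :: c :: d :: t)
  | _ => false

-- length of the maximal P-chained run continuing x into l
def extRun (P : Char → Char → Bool) (x : Char) : List Char → Nat
  | [] => 0
  | y :: t => if P x y then extRun P y t + 1 else 0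

theorem win_eq (a b c d : Char) :
    (pySeqWin [a, b, c, d] || pyEqWin [a, b, c, d]) = good4 a b c d := by
  rw [Bool.eq_iff_iff]
  simp only [pySeqWin, pyEqWin, good4, chain3, eqP, upP, downP, Bool.or_eq_true,
    Bool.and_eq_true, beq_iff_eq]
  by_cases ha : a.isDigit <;> by_cases hb : b.isDigit <;> by_cases hc : c.isDigit <;>
    by_cases hd : d.isDigit <;>
    simp [ha, hb, hc, hd, show ∀ x y : Int, (y - x = 1 ↔ x + 1 = y) from by omega,
      show ∀ x y : Int, (y - x = -1 ↔ x - 1 = y) from by omega] <;> aesop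

theorem slice4 (l : List Char) (i : Nat) :
    PySem.List.slice l (some (Int.ofNat i)) (some (Int.ofNat i + 4)) = (l.drop i).take 4 := by
  have h := PySem.List.slice_natCast_add (xs := l) (j := i) (n := 4)
  simpa using h

theorem range_any_succ (n : Nat) (f : Nat → Bool) :
    (List.range (n + 1)).any f = (f 0 || (List.range n).any (fun i => f (i + 1))) := by
  rw [List.range_succ_eq_map]
  simp only [List.any_cons, List.any_map]
  rfl

theorem anyWin_eq (cs : List Char) :
    (List.range (cs.length - 3)).any
      (fun i => pySeqWin (PySem.List.slice cs (some (Int.ofNat i)) (some (Int.ofNat i + 4))) ||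
                pyEqWin (PySem.List.slice cs (some (Int.ofNat i)) (some (Int.ofNat i + 4)))) = winAny cs := by
  induction cs with
  | nil => simp [winAny]
  | cons a t ih =>
    rcases t with _ | ⟨b, t⟩
    · simp [winAny]
    rcases t with _ | ⟨c, t⟩
    · simp [winAny]
    rcases t with _ | ⟨d, t⟩
    · simp [winAny]
    have hlen : (a :: b :: c :: d :: t).length - 3 = (b :: c :: d :: t).length - 3 + 1 := by
      simp
    rw [hlen, range_any_succ]
    simp only [slice4] at ih ⊢
    simp only [List.drop_succ_cons, List.drop_zero]
    rw [ih]
    rw [show ((a :: b :: c :: d :: t).take 4) = [a, b, c, d] from rfl, win_eq]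
    simp [winAny]

theorem winAny_short (cs : List Char) (h : cs.length < 4) : winAny cs = false := by
  rcases cs with _ | ⟨a, _ | ⟨b, _ | ⟨c, _ | ⟨d, t⟩⟩⟩⟩
  · rfl
  · rfl
  · rfl
  · rfl
  · simp at h; omega

theorem any_or_merge {α : Type} (l : List α) (p q : α → Bool) :
    (l.any fun x => p x || q x) = (l.any p || l.any q) := by
  induction l with
  | nil => rfl
  | cons a t ih =>
    simp only [List.any_cons, ih]
    cases p a <;> cases q a <;> cases t.any p <;> cases t.any q <;> rfl

theorem A_eq_winAny (s : String) : is_sequential_or_repeated_py s = winAny s.toList := by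
  unfold is_sequential_or_repeated_py
  by_cases h : s.toList.length < 4
  · simp only [h, if_true]
    exact (winAny_short _ h).symm
  · simp only [h, if_false, Bool.if_true_left]
    rw [← anyWin_eq]
    simp only [Bool.decide_eq_true]
    exact (any_or_merge _ _ _).symm

theorem ext3_chain (P : Char → Char → Bool) (c : Char) (rest : List Char)
    (h : 3 ≤ extRun P c rest) :
    ∃ r0 r1 r2 t', rest = r0 :: r1 :: r2 :: t' ∧ chain3 P c r0 r1 r2 = true := by
  rcases rest with _ | ⟨r0, _ | ⟨r1, _ | ⟨r2, t'⟩⟩⟩ <;>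
    simp [extRun, chain3] at h ⊢ <;> split_ifs at h <;> simp_all

theorem up_good (a b c d : Char) (h : chain3 upP a b c d = true) : good4 a b c d = true := by
  simp [good4, h]
theorem down_good (a b c d : Char) (h : chain3 downP a b c d = true) : good4 a b c d = true := by
  simp [good4, h]
theorem eq_good (a b c d : Char) (h : chain3 eqP a b c d = true) : good4 a b c d = true := by
  simp [good4, h]

theorem ext_ge3_winAny (P : Char → Char → Bool)
    (hP : ∀ a b c d, chain3 P a b c d = true → good4 a b c d = true)
    (c : Char) (rest : List Char) (h : 3 ≤ extRun P c rest) : winAny (c :: rest) = true := by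
  obtain ⟨r0, r1, r2, t', rfl, hch⟩ := ext3_chain P c rest h
  simp [winAny, hP _ _ _ _ hch]

theorem winAny_tail (prev c : Char) (rest : List Char) (h : winAny (c :: rest) = true) :
    winAny (prev :: c :: rest) = true := by
  rcases rest with _ | ⟨r0, _ | ⟨r1, t'⟩⟩
  · simp [winAny] at h
  · simp [winAny] at h
  · simp [winAny] at h ⊢
    tauto

theorem chain2_ext (P : Char → Char → Bool) (c r0 r1 : Char) (t' : List Char)
    (h0 : P c r0 = true) (h1 : P r0 r1 = true) : 2 ≤ extRun P c (r0 :: r1 :: t') := by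
  simp [extRun, h0, h1]

theorem winAny_cons_elim (prev c : Char) (rest : List Char) (h : winAny (prev :: c :: rest) = true) :
    winAny (c :: rest) = true ∨ ∃ r0 r1 t', rest = r0 :: r1 :: t' ∧ good4 prev c r0 r1 = true := by
  rcases rest with _ | ⟨r0, _ | ⟨r1, t'⟩⟩
  · simp [winAny] at h
  · simp [winAny] at h
  · simp only [winAny, Bool.or_eq_true] at h
    rcases h with h | h
    · exact Or.inr ⟨r0, r1, t', rfl, h⟩
    · exact Or.inl h

theorem scanRuns_eq (t : List Char) : ∀ (prev : Char) (re ru rd : Nat),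
    1 ≤ re → re ≤ 3 → 1 ≤ ru → ru ≤ 3 → 1 ≤ rd → rd ≤ 3 →
    scanRuns prev re ru rd t =
      (winAny (prev :: t) || decide (4 ≤ re + extRun eqP prev t) ||
       decide (4 ≤ ru + extRun upP prev t) || decide (4 ≤ rd + extRun downP prev t)) := by
  induction t with
  | nil =>
    intro prev re ru rd h1 h2 h3 h4 h5 h6
    simp [scanRuns, winAny, extRun]
    omega
  | cons c rest ih =>
    intro prev re ru rd h1 h2 h3 h4 h5 h6
    simp only [scanRuns, extRun]
    by_cases hE : eqP prev c = true
    · have hc : c = prev := by simpa [eqP] using hE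
      have hU : upP prev c = false := by simp [upP, hc, digitVal]
      have hD : downP prev c = false := by simp [downP, hc, digitVal]
      simp only [hE, hU, hD, if_true, if_false, Bool.false_eq_true]
      by_cases hre : re = 3
      · subst hre
        have hx : 4 ≤ 3 + (extRun eqP c rest + 1) := by omega
        simp [hx]
      · rw [if_neg (by simp; omega)]
        rw [ih c (re + 1) 1 1 (by omega) (by omega) (by omega) (by omega) (by omega) (by omega)]
        have harith : re + (extRun eqP c rest + 1) = re + 1 + extRun eqP c rest := by omega
        rw [harith]
        rw [Bool.eq_iff_iff]
        simp only [Bool.or_eq_true, decide_eq_true_eq]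
        constructor
        · rintro (((hW | hX) | hYu) | hYd)
          · exact Or.inl (Or.inl (Or.inl (winAny_tail prev c rest hW)))
          · exact Or.inl (Or.inl (Or.inr hX))
          · exact Or.inl (Or.inl (Or.inl (winAny_tail prev c rest
              (ext_ge3_winAny upP up_good c rest (by omega)))))
          · exact Or.inl (Or.inl (Or.inl (winAny_tail prev c rest
              (ext_ge3_winAny downP down_good c rest (by omega)))))
        · rintro (((hW | hX) | hYu) | hYd)
          · rcases winAny_cons_elim prev c rest hW with hW1 | ⟨r0, r1, t', rfl, hg⟩
            · exact Or.inl (Or.inl (Or.inl hW1))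
            · simp [good4, chain3, hE, hU, hD] at hg
              obtain ⟨h0, h1⟩ := hg
              have := chain2_ext eqP c r0 r1 t' (by simpa using h0) (by simpa using h1)
              exact Or.inl (Or.inl (Or.inr (by omega)))
          · exact Or.inl (Or.inl (Or.inr (by omega)))
          · omega
          · omega
    · have hE' : eqP prev c = false := by simpa using hE
      by_cases hU : upP prev c = true
      · obtain ⟨⟨hpd, hcd⟩, hdiff⟩ : (prev.isDigit = true ∧ c.isDigit = true) ∧
            digitVal c - digitVal prev = 1 := by simpa [upP] using hU
        have hD : downP prev c = false := by simp [downP, hpd, hcd, hdiff]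
        simp only [hE', hU, hD, if_true, if_false, Bool.false_eq_true]
        by_cases hru : ru = 3
        · subst hru
          have hx : 4 ≤ 3 + (extRun upP c rest + 1) := by omega
          simp [hx]
        · rw [if_neg (by simp; omega)]
          rw [ih c 1 (ru + 1) 1 (by omega) (by omega) (by omega) (by omega) (by omega) (by omega)]
          have harith : ru + (extRun upP c rest + 1) = ru + 1 + extRun upP c rest := by omega
          rw [harith]
          rw [Bool.eq_iff_iff]
          simp only [Bool.or_eq_true, decide_eq_true_eq]
          constructor
          · rintro (((hW | hXe) | hXu) | hXd)
            · exact Or.inl (Or.inl (Or.inl (winAny_tail prev c rest hW)))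
            · exact Or.inl (Or.inl (Or.inl (winAny_tail prev c rest
                (ext_ge3_winAny eqP eq_good c rest (by omega)))))
            · exact Or.inl (Or.inr (by omega))
            · exact Or.inl (Or.inl (Or.inl (winAny_tail prev c rest
                (ext_ge3_winAny downP down_good c rest (by omega)))))
          · rintro (((hW | hRe) | hRu) | hRd)
            · rcases winAny_cons_elim prev c rest hW with hW1 | ⟨r0, r1, t', rfl, hg⟩
              · exact Or.inl (Or.inl (Or.inl hW1))
              · simp [good4, chain3, hE', hU, hD] at hg
                obtain ⟨h0, h1⟩ := hg
                have := chain2_ext upP c r0 r1 t' (by simpa using h0) (by simpa using h1)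
                exact Or.inl (Or.inr (by omega))
            · omega
            · exact Or.inl (Or.inr (by omega))
            · omega
      · have hU' : upP prev c = false := by simpa using hU
        by_cases hD : downP prev c = true
        · simp only [hE', hU', hD, if_true, if_false, Bool.false_eq_true]
          by_cases hrd : rd = 3
          · subst hrd
            have hx : 4 ≤ 3 + (extRun downP c rest + 1) := by omega
            simp [hx]
          · rw [if_neg (by simp; omega)]
            rw [ih c 1 1 (rd + 1) (by omega) (by omega) (by omega) (by omega) (by omega) (by omega)]
            have harith : rd + (extRun downP c rest + 1) = rd + 1 + extRun downP c rest := by omega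
            rw [harith]
            rw [Bool.eq_iff_iff]
            simp only [Bool.or_eq_true, decide_eq_true_eq]
            constructor
            · rintro (((hW | hXe) | hXu) | hXd)
              · exact Or.inl (Or.inl (Or.inl (winAny_tail prev c rest hW)))
              · exact Or.inl (Or.inl (Or.inl (winAny_tail prev c rest
                  (ext_ge3_winAny eqP eq_good c rest (by omega)))))
              · exact Or.inl (Or.inl (Or.inl (winAny_tail prev c rest
                  (ext_ge3_winAny upP up_good c rest (by omega)))))
              · exact Or.inr (by omega)
            · rintro (((hW | hRe) | hRu) | hRd)
              · rcases winAny_cons_elim prev c rest hW with hW1 | ⟨r0, r1, t', rfl, hg⟩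
                · exact Or.inl (Or.inl (Or.inl hW1))
                · simp [good4, chain3, hE', hU', hD] at hg
                  obtain ⟨h0, h1⟩ := hg
                  have := chain2_ext downP c r0 r1 t' (by simpa using h0) (by simpa using h1)
                  exact Or.inr (by omega)
              · omega
              · omega
              · exact Or.inr (by omega)
        · have hD' : downP prev c = false := by simpa using hD
          simp only [hE', hU', hD', if_false, Bool.false_eq_true]
          rw [if_neg (by decide)]
          rw [ih c 1 1 1 (by omega) (by omega) (by omega) (by omega) (by omega) (by omega)]
          rw [Bool.eq_iff_iff]
          simp only [Bool.or_eq_true, decide_eq_true_eq]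
          constructor
          · rintro (((hW | hXe) | hXu) | hXd)
            · exact Or.inl (Or.inl (Or.inl (winAny_tail prev c rest hW)))
            · exact Or.inl (Or.inl (Or.inl (winAny_tail prev c rest
                (ext_ge3_winAny eqP eq_good c rest (by omega)))))
            · exact Or.inl (Or.inl (Or.inl (winAny_tail prev c rest
                (ext_ge3_winAny upP up_good c rest (by omega)))))
            · exact Or.inl (Or.inl (Or.inl (winAny_tail prev c rest
                (ext_ge3_winAny downP down_good c rest (by omega)))))
          · rintro (((hW | hRe) | hRu) | hRd)
            · rcases winAny_cons_elim prev c rest hW with hW1 | ⟨r0, r1, t', rfl, hg⟩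
              · exact Or.inl (Or.inl (Or.inl hW1))
              · simp [good4, chain3, hE', hU', hD'] at hg
            · omega
            · omega
            · omega

theorem B_eq_winAny (s : String) : is_sequential_or_repeated_py_alt s = winAny s.toList := by
  unfold is_sequential_or_repeated_py_alt
  rcases hl : s.toList with _ | ⟨c, t⟩
  · rfl
  · show scanRuns c 1 1 1 t = winAny (c :: t)
    rw [scanRuns_eq t c 1 1 1 (by omega) (by omega) (by omega) (by omega) (by omega) (by omega)]
    rw [Bool.eq_iff_iff]
    simp only [Bool.or_eq_true, decide_eq_true_eq]
    constructor
    · rintro (((hW | hXe) | hXu) | hXd)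
      · exact hW
      · exact ext_ge3_winAny eqP eq_good c t (by omega)
      · exact ext_ge3_winAny upP up_good c t (by omega)
      · exact ext_ge3_winAny downP down_good c t (by omega)
    · intro h
      exact Or.inl (Or.inl (Or.inl h))

-- ===== VERDICT (by name: the statement is the Claim_ definition above) =====
theorem is_sequential_or_repeated_py_spec : Claim_equal_is_sequential_or_repeated_py := by
  intro s _
  unfold Spec_is_sequential_or_repeated_py
  rw [A_eq_winAny, B_eq_winAny]
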